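-- pv_equiv track=rewrite | github.com/AI-is-out-there/2025-ergotic-system | code/seminar4v8.py | find_seizure_periods
-- ===== SOURCE A (Python) =====
-- def find_seizure_periods(annotations):
--     """将离散标注点转换为连续时间段"""
--     periods = []
--     start = None
--     for i, val in enumerate(annotations):
--         if val == 1 and start is None:
--             start = i + 1  # 时间从1秒开始
--         elif val == 0 and start is not None:
--             periods.append((start, i))
--             start = None
--     if start is not None:
--         periods.append((start, len(annotations)))
--     return periods
-- ===== SOURCE B (Python) =====
-- def find_seizure_periods(annotations):
--     """将离散标注点转换为连续时间段"""
--     # Pass 1: normalize to an explicit active/inactive state sequence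
--     # (1 switches on, 0 switches off, anything else carries the state).
--     active = []
--     state = False
--     for v in annotations:
--         if v == 1:
--             state = True
--         elif v == 0:
--             state = False
--         active.append(state)
--     # Pass 2: edge detection on the boolean sequence; pair rising edges
--     # (start, 1-based) with falling edges (0-based index of the first False).
--     starts = []
--     ends = []
--     prev = False
--     for i, s in enumerate(active):
--         if s and not prev:
--             starts.append(i + 1)
--         if prev and not s:
--             ends.append(i)
--         prev = s
--     if prev:
--         ends.append(len(active))
--     return list(zip(starts, ends))
-- ===== Notes on version B (the rewrite author's own statement) =====
-- stated objective: alternative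
-- what changed: Replaces A's single loop threading a 'start' sentinel with two passes: first normalize the annotations into an explicit active/inactive boolean sequence, then detect rising/falling edges in that sequence and zip the start list with the end list.
import Mathlib
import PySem

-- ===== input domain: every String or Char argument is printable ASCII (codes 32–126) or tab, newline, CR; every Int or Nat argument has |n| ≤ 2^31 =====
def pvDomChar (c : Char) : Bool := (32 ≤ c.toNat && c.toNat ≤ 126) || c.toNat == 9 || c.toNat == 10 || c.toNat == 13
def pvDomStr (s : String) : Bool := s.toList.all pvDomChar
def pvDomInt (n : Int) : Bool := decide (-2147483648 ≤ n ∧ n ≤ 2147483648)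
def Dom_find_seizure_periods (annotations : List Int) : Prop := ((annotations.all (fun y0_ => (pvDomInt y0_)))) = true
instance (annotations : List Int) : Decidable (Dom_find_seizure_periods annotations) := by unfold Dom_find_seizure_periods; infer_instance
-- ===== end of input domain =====

-- B differs from A by decomposition only (two passes instead of one sentinel loop); same O(n) cost.

-- ===== PORT A =====
-- the enumerate-loop of A, transliterated with an explicit index counter
def pvLoopA : List Int → Nat → Option Int → List (Int × Int) → List (Int × Int) × Option Int
  | [], _, start, periods => (periods, start)
  | v :: rest, i, start, periods =>
    if v = 1 ∧ start = none then
      pvLoopA rest (i + 1) (some ((i : Int) + 1)) periods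
    else if v = 0 ∧ start ≠ none then
      pvLoopA rest (i + 1) none (periods ++ [(start.getD 0, (i : Int))])
    else
      pvLoopA rest (i + 1) start periods

def find_seizure_periods (annotations : List Int) : List (Int × Int) :=
  let r := pvLoopA annotations 0 none []
  match r.2 with
  | some s => r.1 ++ [(s, (annotations.length : Int))]
  | none => r.1

-- ===== PORT B =====
-- pass 1 of B: normalized active/inactive state sequence
def pvActive : Bool → List Int → List Bool
  | _, [] => []
  | state, v :: rest =>
    let s := if v = 1 then true else if v = 0 then false else state
    s :: pvActive s rest

-- pass 2 of B: rising-edge starts and falling-edge ends (i counts positions; at the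
-- end i = length, giving the final 'if prev: ends.append(len(active))')
def pvEdges : Bool → Nat → List Bool → List Int × List Int
  | prev, i, [] => ([], if prev then [(i : Int)] else [])
  | prev, i, s :: rest =>
    let r := pvEdges s (i + 1) rest
    (if s && !prev then ((i : Int) + 1) :: r.1 else r.1,
     if prev && !s then (i : Int) :: r.2 else r.2)

def find_seizure_periods_alt (annotations : List Int) : List (Int × Int) :=
  let active := pvActive false annotations
  let r := pvEdges false 0 active
  r.1.zip r.2

-- ===== PRECONDITION & SPEC =====
def Spec_find_seizure_periods (annotations : List Int) (out : List (Int × Int)) : Prop := out = find_seizure_periods_alt annotations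
instance (annotations : List Int) (out : List (Int × Int)) : Decidable (Spec_find_seizure_periods annotations out) := by unfold Spec_find_seizure_periods; infer_instance

-- ===== CLAIM (what is proved, stated in full; the proofs are below) =====
def Claim_equal_find_seizure_periods : Prop := ∀ (annotations : List Int), Dom_find_seizure_periods annotations → Spec_find_seizure_periods annotations (find_seizure_periods annotations)

-- ===== LEMMAS AND PROOFS =====

-- A's trailing 'if start is not None: periods.append((start, n))'
def pvFinish (r : List (Int × Int) × Option Int) (n : Int) : List (Int × Int) :=
  match r.2 with
  | some s => r.1 ++ [(s, n)]
  | none => r.1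

-- the open-run start carried by A's sentinel, as the list of starts B has not emitted yet
def pvPending : Option Int → List Int
  | none => []
  | some s => [s]

-- invariant: A's loop from index i with sentinel sOpt, finished at total length i+|annos|,
-- equals the already-emitted periods plus B's edge pairs (with the pending start prepended)
theorem pvKey (annos : List Int) : ∀ (i : Nat) (periods : List (Int × Int)) (sOpt : Option Int),
    pvFinish (pvLoopA annos i sOpt periods) ((i : Int) + (annos.length : Int))
      = periods ++ (pvPending sOpt ++ (pvEdges sOpt.isSome i (pvActive sOpt.isSome annos)).1).zip
          (pvEdges sOpt.isSome i (pvActive sOpt.isSome annos)).2 := by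
  induction annos with
  | nil =>
    intro i periods sOpt
    cases sOpt <;> simp [pvLoopA, pvActive, pvEdges, pvFinish, pvPending]
  | cons v rest ih =>
    intro i periods sOpt
    cases sOpt with
    | none =>
      by_cases h1 : v = 1
      · have := ih (i + 1) periods (some ((i : Int) + 1))
        simp [pvLoopA, h1, pvActive, pvEdges, pvPending] at *
        rw [show ((i:Int) + ((rest.length:Int) + 1)) = ((i:Int) + 1 + (rest.length:Int)) from by ring]; exact this
      · by_cases h0 : v = 0
        · have := ih (i + 1) periods none
          simp [pvLoopA, h0, pvActive, pvEdges, pvPending] at *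
          rw [show ((i:Int) + ((rest.length:Int) + 1)) = ((i:Int) + 1 + (rest.length:Int)) from by ring]; exact this
        · have := ih (i + 1) periods none
          simp [pvLoopA, h1, h0, pvActive, pvEdges, pvPending] at *
          rw [show ((i:Int) + ((rest.length:Int) + 1)) = ((i:Int) + 1 + (rest.length:Int)) from by ring]; exact this
    | some s =>
      by_cases h1 : v = 1
      · have := ih (i + 1) periods (some s)
        simp [pvLoopA, h1, pvActive, pvEdges, pvPending] at *
        rw [show ((i:Int) + ((rest.length:Int) + 1)) = ((i:Int) + 1 + (rest.length:Int)) from by ring]; exact this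
      · by_cases h0 : v = 0
        · have := ih (i + 1) (periods ++ [(s, (i : Int))]) none
          simp [pvLoopA, h0, pvActive, pvEdges, pvPending] at *
          rw [show ((i:Int) + ((rest.length:Int) + 1)) = ((i:Int) + 1 + (rest.length:Int)) from by ring]; exact this
        · have := ih (i + 1) periods (some s)
          simp [pvLoopA, h1, h0, pvActive, pvEdges, pvPending] at *
          rw [show ((i:Int) + ((rest.length:Int) + 1)) = ((i:Int) + 1 + (rest.length:Int)) from by ring]; exact this

-- ===== VERDICT (by name: the statement is the Claim_ definition above) =====
theorem find_seizure_periods_spec : Claim_equal_find_seizure_periods := by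
  intro annotations _
  unfold Spec_find_seizure_periods find_seizure_periods find_seizure_periods_alt
  have h := pvKey annotations 0 [] none
  simp [pvFinish, pvPending] at h
  exact h
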